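-- pv_equiv track=rewrite | github.com/Poezedoez/iterative-KG-populator | span_extractors/util.py | glue_subtokens
-- ===== SOURCE A (Python) =====
-- def glue_subtokens(subtokens, remove_special_tokens=False):
--     glued_tokens = []
--     tok2glued = []
--     glued2tok = []
--     extra = 1 if remove_special_tokens else 0
--     for i, token in enumerate(subtokens):
--         if token.startswith('##'):
--             glued_tokens[len(glued_tokens) - 1] = glued_tokens[len(glued_tokens) - 1] + token.replace('##', '')
--         else:
--             glued2tok.append(i)
--             glued_tokens.append(token)
--
--         tok2glued.append(len(glued_tokens) - 1)
--
--     return glued_tokens[extra:len(glued_tokens)-extra], tok2glued, glued2tok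
-- ===== SOURCE B (Python) =====
-- def glue_subtokens(subtokens, remove_special_tokens=False):
--     # Different algorithm: first compute the word-start indices by filtering,
--     # then derive every output from consecutive start pairs (boundaries).
--     n = len(subtokens)
--     glued2tok = [i for i, t in enumerate(subtokens) if not t.startswith('##')]
--     bounds = glued2tok + [n]
--     glued_tokens = []
--     tok2glued = []
--     for j, (lo, hi) in enumerate(zip(bounds, bounds[1:])):
--         glued_tokens.append(subtokens[lo] + ''.join(t.replace('##', '') for t in subtokens[lo + 1:hi]))
--         tok2glued.extend([j] * (hi - lo))
--     extra = 1 if remove_special_tokens else 0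
--     return glued_tokens[extra:len(glued_tokens) - extra], tok2glued, glued2tok
-- ===== Notes on version B (the rewrite author's own statement) =====
-- stated objective: alternative
-- what changed: B first computes the word-start indices by filtering enumerate, then derives all three outputs from consecutive boundary pairs (slicing each word's continuation run and emitting tok2glued in blocks), instead of A's single pass that rewrites the last glued token in place at every '##' subtoken.
import Mathlib
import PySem

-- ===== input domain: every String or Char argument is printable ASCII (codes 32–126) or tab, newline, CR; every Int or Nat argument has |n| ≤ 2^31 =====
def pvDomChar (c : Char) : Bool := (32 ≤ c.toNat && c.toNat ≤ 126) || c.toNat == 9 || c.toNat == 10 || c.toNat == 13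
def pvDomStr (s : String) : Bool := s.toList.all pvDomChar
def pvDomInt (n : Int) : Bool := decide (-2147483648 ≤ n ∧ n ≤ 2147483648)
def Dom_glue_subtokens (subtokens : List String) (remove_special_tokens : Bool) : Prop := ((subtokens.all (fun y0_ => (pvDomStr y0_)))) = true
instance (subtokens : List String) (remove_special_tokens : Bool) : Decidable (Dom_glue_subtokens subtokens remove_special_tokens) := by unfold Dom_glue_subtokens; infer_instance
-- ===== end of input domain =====

-- B replaces A's single pass (rewriting the last glued token in place) by a boundary-based
-- algorithm: filter out the word-start indices first, then derive every output from
-- consecutive start pairs; return value only, neither program mutates its argument.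

-- ===== PORT A =====
-- glued_tokens[len-1] = glued_tokens[len-1] + s  (Python raises IndexError on []; Pre_ excludes that)
def pvSetLastA : List String → String → List String
  | [], _ => []
  | [x], s => [x ++ s]
  | x :: y :: xs, s => x :: pvSetLastA (y :: xs) s

def pvStepA (st : List String × List Int × List Int) (p : Int × String) :
    List String × List Int × List Int :=
  let (glued, tok2glued, glued2tok) := st
  if PySem.Str.startswith p.2 "##" then
    let glued' := pvSetLastA glued (PySem.Str.replace p.2 "##" "")
    (glued', tok2glued ++ [(glued'.length : Int) - 1], glued2tok)
  else
    let glued' := glued ++ [p.2]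
    (glued', tok2glued ++ [(glued'.length : Int) - 1], glued2tok ++ [p.1])

def glue_subtokens (subtokens : List String) (remove_special_tokens : Bool) : List String × List Int × List Int :=
  let extra : Int := if remove_special_tokens then 1 else 0
  let st := (PySem.List.enumerate subtokens 0).foldl pvStepA ([], [], [])
  (PySem.List.slice st.1 (some extra) (some ((st.1.length : Int) - extra)), st.2.1, st.2.2)

-- ===== PORT B =====
-- [i for i, t in enumerate(subtokens) if not t.startswith('##')]
def pvStartsB (subtokens : List String) : List Int :=
  ((PySem.List.enumerate subtokens 0).filter (fun p => !PySem.Str.startswith p.2 "##")).map (fun p => p.1)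

-- subtokens[lo] + ''.join(t.replace('##','') for t in subtokens[lo+1:hi])
def pvMkGluedB (subtokens : List String) (lo hi : Int) : String :=
  PySem.List.pyGetD subtokens lo "" ++
    PySem.Str.join "" ((PySem.List.slice subtokens (some (lo + 1)) (some hi)).map
      (fun t => PySem.Str.replace t "##" ""))

-- loop body: append one glued token, extend tok2glued by [j]*(hi-lo)
def pvStepB (subtokens : List String) (acc : List String × List Int) (p : Int × (Int × Int)) :
    List String × List Int :=
  (acc.1 ++ [pvMkGluedB subtokens p.2.1 p.2.2],
   acc.2 ++ PySem.List.pyRepeat [p.1] (p.2.2 - p.2.1))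

def glue_subtokens_alt (subtokens : List String) (remove_special_tokens : Bool) : List String × List Int × List Int :=
  let glued2tok := pvStartsB subtokens
  let bounds := glued2tok ++ [(subtokens.length : Int)]
  let pairs := bounds.zip (PySem.List.slice bounds (some 1) none)
  let st := (PySem.List.enumerate pairs 0).foldl (pvStepB subtokens) ([], [])
  let extra : Int := if remove_special_tokens then 1 else 0
  (PySem.List.slice st.1 (some extra) (some ((st.1.length : Int) - extra)), st.2, glued2tok)

-- ===== PRECONDITION & SPEC =====
-- Pre_ excludes exactly the inputs whose FIRST subtoken starts with '##': there Python A
-- raises IndexError when indexing the empty output list.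
def Pre_glue_subtokens (subtokens : List String) (remove_special_tokens : Bool) : Prop :=
  PySem.Str.startswith subtokens.headI "##" = false
instance (subtokens : List String) (remove_special_tokens : Bool) : Decidable (Pre_glue_subtokens subtokens remove_special_tokens) := by unfold Pre_glue_subtokens; infer_instance

def pvWitness_glue_subtokens : List String × Bool := (["he", "##llo", "world"], false)

def Spec_glue_subtokens (subtokens : List String) (remove_special_tokens : Bool) (out : List String × List Int × List Int) : Prop := out = glue_subtokens_alt subtokens remove_special_tokens
instance (subtokens : List String) (remove_special_tokens : Bool) (out : List String × List Int × List Int) : Decidable (Spec_glue_subtokens subtokens remove_special_tokens out) := by unfold Spec_glue_subtokens; infer_instance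

-- ===== CLAIM (what is proved, stated in full; the proofs are below) =====
def Claim_equal_glue_subtokens : Prop := ∀ (subtokens : List String) (remove_special_tokens : Bool), Dom_glue_subtokens subtokens remove_special_tokens → Pre_glue_subtokens subtokens remove_special_tokens → Spec_glue_subtokens subtokens remove_special_tokens (glue_subtokens subtokens remove_special_tokens)

-- ===== LEMMAS AND PROOFS =====

-- proof-side closed forms for B's two loop outputs
def pvPairsOf (ts : List String) : List (Int × Int) :=
  (pvStartsB ts ++ [(ts.length : Int)]).zip (pvStartsB ts ++ [(ts.length : Int)]).tail

def pvGluedOf (ts : List String) : List String :=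
  (pvPairsOf ts).map (fun pr => pvMkGluedB ts pr.1 pr.2)

def pvTokOf (ts : List String) : List Int :=
  (PySem.List.enumerate (pvPairsOf ts) 0).flatMap
    (fun p => List.replicate (p.2.2 - p.2.1).toNat p.1)

theorem pv_B_fold (ts : List String) (l : List (Int × (Int × Int))) (a : List String) (b : List Int) :
    l.foldl (pvStepB ts) (a, b) =
      (a ++ l.map (fun p => pvMkGluedB ts p.2.1 p.2.2),
       b ++ l.flatMap (fun p => List.replicate (p.2.2 - p.2.1).toNat p.1)) := by
  induction l generalizing a b with
  | nil => simp
  | cons p l ih => simp [pvStepB, ih, PySem.List.pyRepeat_singleton]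

theorem pv_starts_snoc (ts : List String) (t : String) :
    pvStartsB (ts ++ [t]) =
      pvStartsB ts ++ (if PySem.Str.startswith t "##" then [] else [(ts.length : Int)]) := by
  by_cases h : PySem.Chars.startswith t.toList ['#', '#'] = true <;>
    simp [pvStartsB, PySem.List.enumerate_append, List.filter_append, PySem.Str.startswith_eq,
      show ("##" : String).toList = ['#', '#'] from rfl, h]

theorem pv_mem_starts (ts : List String) (s : Int) (h : s ∈ pvStartsB ts) :
    0 ≤ s ∧ s < (ts.length : Int) := by
  simp only [pvStartsB, List.mem_map, List.mem_filter] at h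
  obtain ⟨p, ⟨hmem, -⟩, rfl⟩ := h
  have h1 : p.1 ∈ (PySem.List.enumerate ts 0).map (fun x => x.1) := List.mem_map_of_mem hmem
  rw [PySem.List.map_fst_enumerate] at h1
  have := (PySem.List.mem_pyRange_one).mp h1
  omega

theorem pv_starts_head (h : String) (r : List String)
    (hp : PySem.Str.startswith h "##" = false) :
    pvStartsB (h :: r) = 0 :: (((PySem.List.enumerate r 1).filter (fun p => !PySem.Str.startswith p.2 "##")).map (fun p => p.1)) := by
  rw [PySem.Str.startswith_eq, show ("##" : String).toList = ['#', '#'] from rfl] at hp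
  simp [pvStartsB, PySem.List.enumerate_cons, hp]

theorem pv_zip_tail_snoc (L : List Int) (h : L ≠ []) (b : Int) :
    (L ++ [b]).zip ((L ++ [b]).tail) =
      L.zip L.tail ++ [(L.getLast h, b)] := by
  induction L with
  | nil => exact absurd rfl h
  | cons x L ih =>
    cases L with
    | nil => simp
    | cons y L =>
      have hih := ih (by simp)
      simp only [List.cons_append, List.tail_cons, List.zip_cons_cons] at hih ⊢
      rw [hih]
      simp

theorem pv_zip_tail_mem (L : List Int) (pr : Int × Int) (h : pr ∈ L.zip L.tail) :
    pr.1 ∈ L.dropLast ∧ pr.2 ∈ L.tail := by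
  induction L with
  | nil => simp at h
  | cons x L ih =>
    cases L with
    | nil => simp at h
    | cons y L =>
      simp only [List.tail_cons, List.zip_cons_cons, List.mem_cons] at h
      rcases h with rfl | h
      · simp
      · obtain ⟨h1, h2⟩ := ih (by simpa using h)
        refine ⟨?_, ?_⟩
        · simp only [List.dropLast_cons₂]
          exact List.mem_cons_of_mem _ h1
        · simp only [List.tail_cons]
          exact List.mem_of_mem_tail h2

theorem pv_getD_stable (ts : List String) (t : String) (lo : Int)
    (h0 : 0 ≤ lo) (h1 : lo < (ts.length : Int)) :
    PySem.List.pyGetD (ts ++ [t]) lo "" = PySem.List.pyGetD ts lo "" := by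
  rw [PySem.List.pyGetD_eq_getElem _ _ h0 (by simp; omega),
      PySem.List.pyGetD_eq_getElem _ _ h0 h1]
  exact List.getElem_append_left (by omega)

theorem pv_mk_stable (ts : List String) (t : String) (lo hi : Int)
    (h0 : 0 ≤ lo) (h1 : lo < (ts.length : Int)) (h2 : hi ≤ (ts.length : Int)) (h3 : 0 ≤ hi) :
    pvMkGluedB (ts ++ [t]) lo hi = pvMkGluedB ts lo hi := by
  unfold pvMkGluedB
  rw [pv_getD_stable ts t lo h0 h1]
  rw [PySem.List.slice_toNat _ (by omega) h3, PySem.List.slice_toNat _ (by omega) h3,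
      List.drop_append_of_le_length (by omega), List.take_append_of_le_length (by simp; omega)]

theorem pv_intercalate_nil (l : List (List Char)) : List.intercalate [] l = l.flatten := by
  induction l with
  | nil => rfl
  | cons a l ih =>
    cases l with
    | nil => simp [List.intercalate]
    | cons b l => simp_all [List.intercalate, List.intersperse]

theorem pv_join_snoc (b : List String) (s : String) :
    PySem.Str.join "" (b ++ [s]) = PySem.Str.join "" b ++ s := by
  simp [PySem.Str.join, PySem.Chars.join, pv_intercalate_nil]

theorem pv_mk_extend (ts : List String) (t : String) (s : Int)
    (h0 : 0 ≤ s) (h1 : s < (ts.length : Int)) :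
    pvMkGluedB (ts ++ [t]) s ((ts.length : Int) + 1) =
      pvMkGluedB ts s (ts.length : Int) ++ PySem.Str.replace t "##" "" := by
  unfold pvMkGluedB
  rw [pv_getD_stable ts t s h0 h1]
  have hs1 : (s + 1).toNat = s.toNat + 1 := by omega
  have hn1 : ((ts.length : Int) + 1).toNat = ts.length + 1 := by omega
  have hn0 : ((ts.length : Int)).toNat = ts.length := by omega
  have hst : s.toNat < ts.length := by omega
  have hsl : PySem.List.slice (ts ++ [t]) (some (s + 1)) (some ((ts.length : Int) + 1)) =
      PySem.List.slice ts (some (s + 1)) (some (ts.length : Int)) ++ [t] := by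
    rw [PySem.List.slice_toNat _ (by omega) (by omega),
        PySem.List.slice_toNat _ (by omega) (by omega), hs1, hn1, hn0,
        List.drop_append_of_le_length (by omega), List.take_append]
    rw [List.take_of_length_le (by simp; omega), List.take_of_length_le (by simp; omega)]
    rw [List.take_of_length_le (by simp)]
  rw [hsl, List.map_append, List.map_cons, List.map_nil, pv_join_snoc, String.append_assoc]

theorem pv_mk_new (ts : List String) (t : String) :
    pvMkGluedB (ts ++ [t]) (ts.length : Int) ((ts.length : Int) + 1) = t := by
  unfold pvMkGluedB
  have e1 : PySem.List.pyGetD (ts ++ [t]) (ts.length : Int) "" = t := by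
    rw [PySem.List.pyGetD_eq_getElem _ _ (by omega) (by simp)]
    simp
  have e2 : PySem.List.slice (ts ++ [t]) (some ((ts.length : Int) + 1))
      (some ((ts.length : Int) + 1)) = [] := by
    rw [PySem.List.slice_toNat _ (by omega) (by omega)]
    simp
  rw [e1, e2, List.map_nil, show PySem.Str.join "" ([] : List String) = "" from rfl,
      String.append_empty]

theorem pv_setLastA_cons (g : String) (l : List String) (r : String) (h : l ≠ []) :
    pvSetLastA (g :: l) r = g :: pvSetLastA l r := by
  cases l with
  | nil => exact absurd rfl h
  | cons a l => rfl

theorem pv_setLast_snoc (G : List String) (x r : String) :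
    pvSetLastA (G ++ [x]) r = G ++ [x ++ r] := by
  induction G with
  | nil => rfl
  | cons g G ih => rw [List.cons_append, pv_setLastA_cons _ _ _ (by simp), ih, List.cons_append]

theorem pv_pair_bounds (ts : List String) (pr : Int × Int) (h : pr ∈ pvPairsOf ts) :
    0 ≤ pr.1 ∧ pr.1 < (ts.length : Int) ∧ 0 ≤ pr.2 ∧ pr.2 ≤ (ts.length : Int) := by
  obtain ⟨h1, h2⟩ := pv_zip_tail_mem _ _ h
  rw [List.dropLast_concat] at h1
  have hb1 := pv_mem_starts ts _ h1
  have h2' : pr.2 ∈ pvStartsB ts ++ [(ts.length : Int)] := List.mem_of_mem_tail h2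
  rcases List.mem_append.mp h2' with h3 | h3
  · have hb2 := pv_mem_starts ts _ h3
    exact ⟨hb1.1, hb1.2, hb2.1, le_of_lt hb2.2⟩
  · simp only [List.mem_singleton] at h3
    exact ⟨hb1.1, hb1.2, by omega, by omega⟩

-- main characterization of A's fold
theorem pv_A_fold (ts : List String) (hp : PySem.Str.startswith ts.headI "##" = false) :
    (PySem.List.enumerate ts 0).foldl pvStepA ([], [], []) =
      (pvGluedOf ts, pvTokOf ts, pvStartsB ts) := by
  induction ts using List.reverseRecOn with
  | nil => rfl
  | append_singleton ts t ih =>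
    have hpre : PySem.Str.startswith ts.headI "##" = false := by
      cases ts with
      | nil => decide
      | cons h r => simpa using hp
    rw [PySem.List.enumerate_append, List.foldl_append, ih hpre]
    have hone : PySem.List.enumerate [t] (0 + (ts.length : Int)) = [((ts.length : Int), t)] := by
      simp [PySem.List.enumerate_cons, PySem.List.enumerate_nil]
    rw [hone, List.foldl_cons, List.foldl_nil]
    have hlen1 : (((ts ++ [t]).length : Int)) = (ts.length : Int) + 1 := by simp
    by_cases hsw : PySem.Str.startswith t "##" = true
    · -- continuation token '##…'
      have hts : ts ≠ [] := by
        intro hnil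
        subst hnil
        rw [PySem.Str.startswith_eq, show ("##" : String).toList = ['#', '#'] from rfl] at hsw
        simp at hp
        rw [hp] at hsw
        exact Bool.false_ne_true hsw
      have hS : pvStartsB ts ≠ [] := by
        obtain ⟨h, r, rfl⟩ : ∃ h r, ts = h :: r := by
          cases ts with
          | nil => exact absurd rfl hts
          | cons h r => exact ⟨h, r, rfl⟩
        rw [pv_starts_head h r (by simpa using hpre)]
        simp
      have hlast := pv_mem_starts ts _ (List.getLast_mem hS)
      have hPold : pvPairsOf ts =
          (pvStartsB ts).zip (pvStartsB ts).tail ++ [((pvStartsB ts).getLast hS, (ts.length : Int))] :=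
        pv_zip_tail_snoc _ hS _
      have hSnew : pvStartsB (ts ++ [t]) = pvStartsB ts := by
        rw [pv_starts_snoc, if_pos hsw, List.append_nil]
      have hPnew : pvPairsOf (ts ++ [t]) =
          (pvStartsB ts).zip (pvStartsB ts).tail ++ [((pvStartsB ts).getLast hS, (ts.length : Int) + 1)] := by
        unfold pvPairsOf
        rw [hSnew, hlen1]
        exact pv_zip_tail_snoc _ hS _
      have hmapeq : ((pvStartsB ts).zip (pvStartsB ts).tail).map
            (fun pr => pvMkGluedB (ts ++ [t]) pr.1 pr.2) =
          ((pvStartsB ts).zip (pvStartsB ts).tail).map (fun pr => pvMkGluedB ts pr.1 pr.2) := by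
        apply List.map_congr_left
        intro pr hpr
        have hb := pv_pair_bounds ts pr (by rw [hPold]; exact List.mem_append_left _ hpr)
        exact pv_mk_stable ts t pr.1 pr.2 hb.1 hb.2.1 hb.2.2.2 hb.2.2.1
      have hg_old : pvGluedOf ts =
          ((pvStartsB ts).zip (pvStartsB ts).tail).map (fun pr => pvMkGluedB ts pr.1 pr.2) ++
            [pvMkGluedB ts ((pvStartsB ts).getLast hS) (ts.length : Int)] := by
        unfold pvGluedOf
        rw [hPold, List.map_append, List.map_cons, List.map_nil]
      have hg_new : pvGluedOf (ts ++ [t]) =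
          ((pvStartsB ts).zip (pvStartsB ts).tail).map (fun pr => pvMkGluedB ts pr.1 pr.2) ++
            [pvMkGluedB ts ((pvStartsB ts).getLast hS) (ts.length : Int) ++ PySem.Str.replace t "##" ""] := by
        unfold pvGluedOf
        rw [hPnew, List.map_append, List.map_cons, List.map_nil, hmapeq]
        rw [pv_mk_extend ts t _ hlast.1 hlast.2]
      have ht_old : pvTokOf ts =
          (PySem.List.enumerate ((pvStartsB ts).zip (pvStartsB ts).tail) 0).flatMap
              (fun p => List.replicate (p.2.2 - p.2.1).toNat p.1) ++
            List.replicate (((ts.length : Int)) - (pvStartsB ts).getLast hS).toNat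
              (((pvStartsB ts).zip (pvStartsB ts).tail).length : Int) := by
        unfold pvTokOf
        rw [hPold, PySem.List.enumerate_append, List.flatMap_append]
        simp [PySem.List.enumerate_cons, PySem.List.enumerate_nil]
      have ht_new : pvTokOf (ts ++ [t]) =
          (PySem.List.enumerate ((pvStartsB ts).zip (pvStartsB ts).tail) 0).flatMap
              (fun p => List.replicate (p.2.2 - p.2.1).toNat p.1) ++
            (List.replicate (((ts.length : Int)) - (pvStartsB ts).getLast hS).toNat
              (((pvStartsB ts).zip (pvStartsB ts).tail).length : Int) ++
             [(((pvStartsB ts).zip (pvStartsB ts).tail).length : Int)]) := by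
        unfold pvTokOf
        rw [hPnew, PySem.List.enumerate_append, List.flatMap_append]
        have harith : ((ts.length : Int) + 1 - (pvStartsB ts).getLast hS).toNat =
            ((ts.length : Int) - (pvStartsB ts).getLast hS).toNat + 1 := by omega
        simp [PySem.List.enumerate_cons, PySem.List.enumerate_nil, harith, List.replicate_succ']
      rw [hSnew, hg_new, ht_new]
      simp only [pvStepA, hsw, if_true]
      rw [hg_old, ht_old, pv_setLast_snoc]
      have hlg : ((((pvStartsB ts).zip (pvStartsB ts).tail).map (fun pr => pvMkGluedB ts pr.1 pr.2) ++
          [pvMkGluedB ts ((pvStartsB ts).getLast hS) (ts.length : Int) ++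
            PySem.Str.replace t "##" ""]).length : Int) - 1 =
          (((pvStartsB ts).zip (pvStartsB ts).tail).length : Int) := by
        simp
      rw [hlg]
      simp [List.append_assoc]
    · -- word-start token
      have hSnew : pvStartsB (ts ++ [t]) = pvStartsB ts ++ [(ts.length : Int)] := by
        rw [pv_starts_snoc, if_neg hsw]
      have hPnew : pvPairsOf (ts ++ [t]) = pvPairsOf ts ++ [((ts.length : Int), (ts.length : Int) + 1)] := by
        unfold pvPairsOf
        rw [hSnew, hlen1, pv_zip_tail_snoc (pvStartsB ts ++ [(ts.length : Int)]) (by simp) _,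
            List.getLast_concat]
      have hg_new : pvGluedOf (ts ++ [t]) = pvGluedOf ts ++ [t] := by
        unfold pvGluedOf
        rw [hPnew, List.map_append, List.map_cons, List.map_nil, pv_mk_new]
        congr 1
        apply List.map_congr_left
        intro pr hpr
        have hb := pv_pair_bounds ts pr hpr
        exact pv_mk_stable ts t pr.1 pr.2 hb.1 hb.2.1 hb.2.2.2 hb.2.2.1
      have ht_new : pvTokOf (ts ++ [t]) = pvTokOf ts ++ [((pvPairsOf ts).length : Int)] := by
        unfold pvTokOf
        rw [hPnew, PySem.List.enumerate_append, List.flatMap_append]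
        have harith : ((ts.length : Int) + 1 - (ts.length : Int)).toNat = 1 := by omega
        simp only [PySem.List.enumerate_cons, PySem.List.enumerate_nil, harith,
          List.flatMap_cons, List.flatMap_nil, List.replicate_one, List.append_nil, zero_add]
      rw [hSnew, hg_new, ht_new]
      simp only [pvStepA, hsw, if_false, Bool.false_eq_true]
      have hlg : (((pvGluedOf ts) ++ [t]).length : Int) - 1 = ((pvPairsOf ts).length : Int) := by
        simp [pvGluedOf]
      rw [hlg]

-- ===== VERDICT (by name: the statement is the Claim_ definition above) =====
theorem glue_subtokens_spec : Claim_equal_glue_subtokens := by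
  intro subtokens remove_special_tokens _ hpre
  unfold Spec_glue_subtokens
  have hg : (PySem.List.enumerate ((pvStartsB subtokens ++ [(subtokens.length : Int)]).zip
        (pvStartsB subtokens ++ [(subtokens.length : Int)]).tail) 0).map
      (fun p => pvMkGluedB subtokens p.2.1 p.2.2) = pvGluedOf subtokens := by
    unfold pvGluedOf pvPairsOf
    rw [show (fun p : Int × (Int × Int) => pvMkGluedB subtokens p.2.1 p.2.2) =
        ((fun pr : Int × Int => pvMkGluedB subtokens pr.1 pr.2) ∘ Prod.snd) from rfl,
      ← List.map_map, PySem.List.map_snd_enumerate]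
  have ht : (PySem.List.enumerate ((pvStartsB subtokens ++ [(subtokens.length : Int)]).zip
        (pvStartsB subtokens ++ [(subtokens.length : Int)]).tail) 0).flatMap
      (fun p => List.replicate (p.2.2 - p.2.1).toNat p.1) = pvTokOf subtokens := rfl
  simp only [glue_subtokens, glue_subtokens_alt, PySem.List.slice_from_one,
    pv_A_fold subtokens hpre, pv_B_fold, List.nil_append, hg, ht]
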